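-- pv_equiv track=rewrite | github.com/hjtr7mymht-dot/WOA_AutoBot | simple_ocr.py | parse_cost
-- ===== SOURCE A (Python) =====
-- def parse_cost(text):
--     try:
--         if not text or '/' not in text: return None
--         clean = "".join([c for c in text if c.isdigit() or c == '/'])
--         parts = clean.split('/')
--         if len(parts) < 2: return None
--         cost_str = parts[1]
--         if not cost_str: return None
--         cost = int(cost_str)
--         if cost == 0: return 10
--         if cost < 0 or cost > 25: return None
--         return cost
--     except Exception:
--         return None
-- ===== SOURCE B (Python) =====
-- def parse_cost(text):
--     if not text:
--         return None
--     seen = False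
--     digits = []
--     for c in text:
--         if c == '/':
--             if seen:
--                 break
--             seen = True
--         elif seen and c.isdigit():
--             digits.append(c)
--     if not seen or not digits:
--         return None
--     cost = int("".join(digits))
--     if cost == 0:
--         return 10
--     if cost > 25:
--         return None
--     return cost
-- ===== Notes on version B (the rewrite author's own statement) =====
-- stated objective: alternative
-- what changed: A filters the whole string into a digits-and-slashes copy, splits that copy on every slash and takes parts[1]; B makes one early-exiting pass over the original string, collecting digits only between the first and second slash, with no intermediate string, split or try/except.
import Mathlib
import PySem

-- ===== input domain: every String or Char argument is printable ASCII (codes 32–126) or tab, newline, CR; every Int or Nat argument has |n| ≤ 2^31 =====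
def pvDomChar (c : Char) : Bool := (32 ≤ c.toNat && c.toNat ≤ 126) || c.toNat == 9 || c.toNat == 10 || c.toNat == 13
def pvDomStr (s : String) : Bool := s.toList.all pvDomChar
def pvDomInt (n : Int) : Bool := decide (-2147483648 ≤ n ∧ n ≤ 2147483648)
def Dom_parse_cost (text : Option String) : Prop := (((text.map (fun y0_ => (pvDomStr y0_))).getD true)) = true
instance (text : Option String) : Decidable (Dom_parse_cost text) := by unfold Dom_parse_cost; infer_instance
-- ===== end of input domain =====

set_option maxRecDepth 4000


-- B replaces A's filter-whole-string / split-on-every-slash / take-parts[1] pipeline by a single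
-- early-exiting pass that collects the digits strictly between the first and second slash (objective: alternative).

-- ===== PORT A =====
def parse_cost (text : Option String) : Option Int :=
  match text with
  | none => none                                     -- `not text` (None)
  | some s =>
    let cs := s.toList
    if cs.isEmpty || !(PySem.Chars.isIn ['/'] cs) then none  -- `not text or '/' not in text`
    else
      let clean := cs.filter (fun c => PySem.Chars.isdigit c || c == '/')
      let parts := PySem.Chars.splitOn clean ['/']
      if parts.length < 2 then none
      else
        match PySem.List.pyGet? parts 1 with         -- parts[1]; none = IndexError → except → None
        | none => none
        | some cost_str =>
          if cost_str.isEmpty then none              -- `if not cost_str`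
          else
            match PySem.Int.ofChars? cost_str with   -- int(cost_str); none = ValueError → except → None
            | none => none
            | some cost =>
              if cost = 0 then some 10
              else if cost < 0 || cost > 25 then none
              else some cost

-- ===== PORT B =====
-- the for-loop of Source B: state = (seen, digits); returning the state early = Python's `break`
def pcLoop : List Char → Bool → List Char → Bool × List Char
  | [], seen, digits => (seen, digits)
  | c :: rest, seen, digits =>
    if c = '/' then
      if seen then (seen, digits)                    -- break
      else pcLoop rest true digits
    else if seen && PySem.Chars.isdigit c then
      pcLoop rest seen (digits ++ [c])               -- digits.append(c)
    else
      pcLoop rest seen digits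

def parse_cost_alt (text : Option String) : Option Int :=
  match text with
  | none => none                                     -- `not text`
  | some s =>
    let cs := s.toList
    if cs.isEmpty then none
    else
      let r := pcLoop cs false []
      if !r.1 || r.2.isEmpty then none               -- `if not seen or not digits`
      else
        match PySem.Int.ofChars? r.2 with            -- int("".join(digits)); never none here (digits is a nonempty run of 0-9)
        | none => none
        | some cost =>
          if cost = 0 then some 10
          else if cost > 25 then none
          else some cost

-- ===== PRECONDITION & SPEC =====
def Spec_parse_cost (text : Option String) (out : Option Int) : Prop := out = parse_cost_alt text
instance (text : Option String) (out : Option Int) : Decidable (Spec_parse_cost text out) := by unfold Spec_parse_cost; infer_instance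

-- ===== CLAIM (what is proved, stated in full; the proofs are below) =====
def Claim_equal_parse_cost : Prop := ∀ (text : Option String), Dom_parse_cost text → Spec_parse_cost text (parse_cost text)

-- ===== LEMMAS AND PROOFS =====

-- A's filter predicate, named for the proofs
def pvKeep (c : Char) : Bool := PySem.Chars.isdigit c || c == '/'

-- the digit run strictly between the first and the second '/' — the value both programs parse
def pvSeg (cs : List Char) : List Char :=
  (((cs.dropWhile (· != '/')).tail).takeWhile (· != '/')).filter PySem.Chars.isdigit

-- proof-side single-accumulator model of PySem.Chars.splitOn.go for the separator "/"
def pvSplit : List Char → List Char → List (List Char)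
  | [], cur => [cur.reverse]
  | c :: rest, cur => if c = '/' then cur.reverse :: pvSplit rest [] else pvSplit rest (c :: cur)

theorem pvSplit_go_eq : ∀ (fuel : Nat) (l cur : List Char) (acc : List (List Char)),
    l.length < fuel →
    PySem.Chars.splitOn.go ['/'] fuel l cur acc = acc.reverse ++ pvSplit l cur := by
  intro fuel
  induction fuel with
  | zero => intro l cur acc h; omega
  | succ fuel ih =>
    intro l cur acc h
    cases l with
    | nil => rw [PySem.Chars.splitOn.go.eq_def]; simp [pvSplit]
    | cons c rest =>
      rw [PySem.Chars.splitOn.go.eq_def]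
      simp only [List.isPrefixOf]
      by_cases hc : c = '/'
      · subst hc
        simp only [List.length_cons] at h
        simp only [if_pos (by decide : ('/' == '/' && true) = true), List.length_cons, List.drop_succ_cons, List.length_nil, List.drop_zero]
        rw [ih rest [] (cur.reverse :: acc) (by omega)]
        simp only [pvSplit, if_pos rfl, List.reverse_cons, List.append_assoc, List.cons_append, List.nil_append, if_true]
      · have : ('/' == c) = false := beq_eq_false_iff_ne.mpr (fun e => hc e.symm)
        simp only [this, Bool.false_and, if_neg Bool.false_ne_true]
        simp only [List.length_cons] at h
        rw [ih rest (c :: cur) acc (by omega)]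
        conv_rhs => rw [pvSplit, if_neg hc]

theorem splitOn_eq_pvSplit (l : List Char) :
    PySem.Chars.splitOn l ['/'] = pvSplit l [] := by
  have := pvSplit_go_eq (l.length + 1) l [] [] (by omega)
  simpa [PySem.Chars.splitOn] using this

theorem pvSplit_cons (l : List Char) : ∀ cur,
    ∃ tl, pvSplit l cur = (cur.reverse ++ l.takeWhile (· != '/')) :: tl := by
  induction l with
  | nil => intro cur; exact ⟨[], by simp [pvSplit]⟩
  | cons c rest ih =>
    intro cur
    by_cases hc : c = '/'
    · subst hc
      exact ⟨pvSplit rest [], by simp [pvSplit]⟩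
    · obtain ⟨tl, htl⟩ := ih (c :: cur)
      refine ⟨tl, ?_⟩
      rw [pvSplit, if_neg hc, htl]
      simp [List.takeWhile_cons, bne_iff_ne, hc]

theorem pvSplit_of_mem (l : List Char) : ∀ (cur : List Char), '/' ∈ l →
    pvSplit l cur = (cur.reverse ++ l.takeWhile (· != '/')) :: pvSplit ((l.dropWhile (· != '/')).tail) [] := by
  induction l with
  | nil => intro cur h; simp at h
  | cons c rest ih =>
    intro cur h
    by_cases hc : c = '/'
    · subst hc
      simp [pvSplit, List.takeWhile_cons, List.dropWhile_cons]
    · have hr : '/' ∈ rest := by cases List.mem_cons.mp h with | inl e => exact absurd e.symm hc | inr m => exact m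
      rw [pvSplit, if_neg hc, ih (c :: cur) hr]
      simp [List.takeWhile_cons, List.dropWhile_cons, bne_iff_ne, hc]

theorem takeWhile_filter_keep (l : List Char) :
    (l.filter pvKeep).takeWhile (· != '/') = (l.takeWhile (· != '/')).filter PySem.Chars.isdigit := by
  induction l with
  | nil => simp
  | cons c rest ih =>
    by_cases hc : c = '/'
    · subst hc; simp [pvKeep, List.filter_cons, List.takeWhile_cons]
    · have hb : (c != '/') = true := bne_iff_ne.mpr hc
      by_cases hd : PySem.Chars.isdigit c
      · simp [pvKeep, List.filter_cons, List.takeWhile_cons, hd, hb, ih]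
      · have : pvKeep c = false := by
          simp [pvKeep, hd, beq_eq_false_iff_ne.mpr hc]
        simp [List.filter_cons, List.takeWhile_cons, this, hb, ih,
          Bool.of_not_eq_true hd]

theorem filter_seg (cs : List Char) (h : '/' ∈ cs) :
    (((cs.filter pvKeep).dropWhile (· != '/')).tail).takeWhile (· != '/') = pvSeg cs := by
  induction cs with
  | nil => simp at h
  | cons c rest ih =>
    by_cases hc : c = '/'
    · subst hc
      have hk : pvKeep '/' = true := by simp [pvKeep]
      simp only [pvSeg, List.filter_cons, hk, if_pos rfl, List.dropWhile_cons,
        bne_self_eq_false, Bool.false_eq_true, if_false, List.tail_cons]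
      · exact takeWhile_filter_keep rest
    · have hr : '/' ∈ rest := by cases List.mem_cons.mp h with | inl e => exact absurd e.symm hc | inr m => exact m
      have hb : (c != '/') = true := bne_iff_ne.mpr hc
      have hseg : pvSeg (c :: rest) = pvSeg rest := by
        simp [pvSeg, List.dropWhile_cons, hb]
      rw [hseg, ← ih hr]
      by_cases hd : pvKeep c
      · simp [List.filter_cons, hd, List.dropWhile_cons, hb]
      · simp [List.filter_cons, Bool.of_not_eq_true hd]

theorem pcLoop_seen (cs : List Char) : ∀ ds,
    pcLoop cs true ds = (true, ds ++ (cs.takeWhile (· != '/')).filter PySem.Chars.isdigit) := by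
  induction cs with
  | nil => intro ds; simp [pcLoop]
  | cons c rest ih =>
    intro ds
    by_cases hc : c = '/'
    · subst hc; simp [pcLoop, List.takeWhile_cons]
    · have hb : (c != '/') = true := bne_iff_ne.mpr hc
      by_cases hd : PySem.Chars.isdigit c
      · rw [pcLoop, if_neg hc, if_pos (by simp [hd]), ih]
        simp [List.takeWhile_cons, hb, hd]
      · rw [pcLoop, if_neg hc, if_neg (by simp [hd]), ih]
        simp [List.takeWhile_cons, hb, Bool.of_not_eq_true hd]

theorem pcLoop_unseen_of_mem (cs : List Char) : ∀ ds, '/' ∈ cs →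
    pcLoop cs false ds = pcLoop ((cs.dropWhile (· != '/')).tail) true ds := by
  induction cs with
  | nil => intro ds h; simp at h
  | cons c rest ih =>
    intro ds h
    by_cases hc : c = '/'
    · subst hc; simp [pcLoop, List.dropWhile_cons]
    · have hr : '/' ∈ rest := by cases List.mem_cons.mp h with | inl e => exact absurd e.symm hc | inr m => exact m
      have hb : (c != '/') = true := bne_iff_ne.mpr hc
      rw [pcLoop, if_neg hc, if_neg (by simp), ih ds hr]
      simp [List.dropWhile_cons, hb]

theorem pcLoop_unseen_of_not_mem (cs : List Char) : ∀ ds, '/' ∉ cs →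
    pcLoop cs false ds = (false, ds) := by
  induction cs with
  | nil => intro ds _; simp [pcLoop]
  | cons c rest ih =>
    intro ds h
    have hc : ¬ c = '/' := fun e => h (by simp [e])
    rw [pcLoop, if_neg hc, if_neg (by simp), ih ds (fun m => h (List.mem_cons_of_mem _ m))]

theorem ofChars?_digits_nonneg (ds : List Char) (h : ∀ c ∈ ds, PySem.Chars.isdigit c = true)
    {n : Int} (hn : PySem.Int.ofChars? ds = some n) : 0 ≤ n := by
  have hns : ∀ c ∈ ds, PySem.Int.isIntSpace c = false := by
    intro c hc
    have hd := h c hc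
    simp only [PySem.Chars.isdigit, Bool.and_eq_true, decide_eq_true_eq] at hd
    simp only [PySem.Int.isIntSpace]
    have h1 : '0'.val ≤ c.val := hd.1
    have h2 : c.val ≤ '9'.val := hd.2
    simp only [Bool.or_eq_false_iff, decide_eq_false_iff_not]
    refine ⟨⟨⟨⟨⟨?_, ?_⟩, ?_⟩, ?_⟩, ?_⟩, ?_⟩ <;>
      (intro e; subst e; revert h1 h2; decide)
  have hdw : ∀ (l : List Char), (∀ c ∈ l, PySem.Int.isIntSpace c = false) →
      l.dropWhile PySem.Int.isIntSpace = l := by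
    intro l hl
    cases l with
    | nil => rfl
    | cons a t => rw [List.dropWhile_cons_of_neg (by simp [hl a (by simp)])]
  rw [PySem.Int.ofChars?] at hn
  rw [hdw ds hns] at hn
  rw [hdw ds.reverse (by intro c hc; exact hns c (List.mem_reverse.mp hc))] at hn
  rw [List.reverse_reverse] at hn
  cases ds with
  | nil =>
    have : (none : Option Int) = some n := hn
    exact absurd this (by simp)
  | cons d t =>
    have hd := h d (by simp)
    have hd' : '0' ≤ d ∧ d ≤ '9' := by
      simpa [PySem.Chars.isdigit] using hd
    split at hn
    · rename_i ds heq
      exact absurd (congrArg (fun l => List.head? l) heq) (by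
        simp only [List.head?]
        intro e
        have : d = '-' := by simpa using e
        subst this
        exact absurd hd' (by decide))
    · rename_i ds heq
      exact absurd (congrArg (fun l => List.head? l) heq) (by
        simp only [List.head?]
        intro e
        have : d = '+' := by simpa using e
        subst this
        exact absurd hd' (by decide))
    · simp only [Option.map_eq_some_iff] at hn
      obtain ⟨m, hm, rfl⟩ := hn
      obtain ⟨a, ha, h2⟩ := Option.bind_eq_some_iff.mp hm
      have : ((a : Int)) = m := by simpa using h2
      omega

theorem isIn_slash_iff (cs : List Char) : PySem.Chars.isIn ['/'] cs = true ↔ '/' ∈ cs := by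
  rw [PySem.Chars.isIn_iff_infix]
  constructor
  · intro h; exact h.mem (by simp)
  · intro h
    obtain ⟨u, v, rfl⟩ := List.mem_iff_append.mp h
    exact ⟨u, v, by simp⟩

-- ===== VERDICT (by name: the statement is the Claim_ definition above) =====
theorem parse_cost_spec : Claim_equal_parse_cost := by
  intro text _
  unfold Spec_parse_cost
  cases text with
  | none => rfl
  | some s =>
    simp only [parse_cost, parse_cost_alt]
    by_cases hm : '/' ∈ s.toList
    · have hne : s.toList ≠ [] := by intro e; rw [e] at hm; exact absurd hm (by simp)
      have hempty : s.toList.isEmpty = false := by simpa using hne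
      have hin : PySem.Chars.isIn ['/'] s.toList = true := (isIn_slash_iff s.toList).mpr hm
      simp only [hempty, hin, Bool.not_true, Bool.or_false, Bool.false_eq_true, if_false]
      -- A's parts
      have hmc : '/' ∈ s.toList.filter pvKeep :=
        List.mem_filter.mpr ⟨hm, by simp [pvKeep]⟩
      have hparts : PySem.Chars.splitOn (s.toList.filter pvKeep) ['/'] =
          ([].reverse ++ (s.toList.filter pvKeep).takeWhile (· != '/')) ::
            pvSplit (((s.toList.filter pvKeep).dropWhile (· != '/')).tail) [] := by
        rw [splitOn_eq_pvSplit, pvSplit_of_mem _ [] hmc]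
      obtain ⟨tl, htl⟩ := pvSplit_cons (((s.toList.filter pvKeep).dropWhile (· != '/')).tail) []
      have hseg : (((s.toList.filter pvKeep).dropWhile (· != '/')).tail).takeWhile (· != '/') = pvSeg s.toList :=
        filter_seg s.toList hm
      -- B's loop result
      have hloop : pcLoop s.toList false [] = (true, pvSeg s.toList) := by
        rw [pcLoop_unseen_of_mem s.toList [] hm, pcLoop_seen]
        simp [pvSeg]
      show (let clean := s.toList.filter (fun c => PySem.Chars.isdigit c || c == '/'); _) = _
      simp only [show (fun c => PySem.Chars.isdigit c || c == '/') = pvKeep from rfl]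
      rw [hparts, htl, hseg, hloop]
      simp only [List.nil_append, List.length_cons, List.reverse_nil]
      rw [if_neg (by omega)]
      have hget : PySem.List.pyGet? (((s.toList.filter pvKeep).takeWhile (· != '/')) :: pvSeg s.toList :: tl) 1
          = some (pvSeg s.toList) := by
        simp [PySem.List.pyGet?, PySem.List.pyIdx?]
      rw [hget]
      by_cases he : (pvSeg s.toList).isEmpty
      · simp [he]
      · simp only [he, Bool.not_true, Bool.false_or, Bool.false_eq_true, if_false]
        cases hoc : PySem.Int.ofChars? (pvSeg s.toList) with
        | none => rfl
        | some cost =>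
          have hnn : 0 ≤ cost :=
            ofChars?_digits_nonneg _ (by intro c hc; exact (List.mem_filter.mp hc).2) hoc
          by_cases h0 : cost = 0
          · simp [h0]
          · simp only [h0, if_false]
            have : ¬ cost < 0 := by omega
            simp [this]
    · have hin : PySem.Chars.isIn ['/'] s.toList = false := by
        cases hq : PySem.Chars.isIn ['/'] s.toList
        · rfl
        · exact absurd ((isIn_slash_iff s.toList).mp hq) hm
      rw [hin]
      by_cases he : s.toList.isEmpty
      · simp [he]
      · simp only [he, hin, Bool.not_false, Bool.or_true, if_true]
        rw [pcLoop_unseen_of_not_mem s.toList [] hm]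
        simp
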